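-- pv_equiv track=rewrite | github.com/InsightGit/Morpheus | buildtools/generate_breathe_rst/generate_breathe_rst.py | get_object_name
-- ===== SOURCE A (Python) =====
-- def get_object_name(object_type_name: str, object_name_line: str) -> str:
--     looking_for_class_name = False
--     string_space_split = object_name_line.split(" ")
--
--     for string in string_space_split:
--         if len(string) == 0:
--             continue
--         elif looking_for_class_name:
--             return string
--         elif string == object_type_name:
--             looking_for_class_name = True
--
--     return ""
-- ===== SOURCE B (Python) =====
-- def get_object_name(object_type_name: str, object_name_line: str) -> str:
--     tokens = [t for t in object_name_line.split(" ") if t]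
--     try:
--         i = tokens.index(object_type_name)
--     except ValueError:
--         return ""
--     return tokens[i + 1] if i + 1 < len(tokens) else ""
-- ===== Notes on version B (the rewrite author's own statement) =====
-- stated objective: simpler
-- what changed: Replaced the stateful flag-carrying scan with a filter-then-index-then-lookup decomposition: filter empty tokens once, locate the type name with list.index, return the following token by position.
import Mathlib
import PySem

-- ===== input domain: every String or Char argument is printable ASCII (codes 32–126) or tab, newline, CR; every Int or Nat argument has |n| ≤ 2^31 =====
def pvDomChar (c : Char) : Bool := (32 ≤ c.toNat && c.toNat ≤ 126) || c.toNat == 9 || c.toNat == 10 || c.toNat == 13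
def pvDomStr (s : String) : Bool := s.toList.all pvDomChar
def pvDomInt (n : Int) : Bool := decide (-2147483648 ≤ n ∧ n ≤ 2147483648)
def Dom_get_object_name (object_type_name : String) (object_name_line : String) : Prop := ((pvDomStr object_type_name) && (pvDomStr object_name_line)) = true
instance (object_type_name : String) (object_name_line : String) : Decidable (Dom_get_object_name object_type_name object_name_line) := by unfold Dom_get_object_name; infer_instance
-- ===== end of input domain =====

-- B replaces A's stateful flag-carrying scan by a filter-then-index-then-lookup decomposition (objective: simpler).

-- ===== PORT A =====
-- literal port of A's loop: the flag 'looking_for_class_name' is the Bool state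
def get_object_name_loop (object_type_name : String) : List String → Bool → String
  | [], _ => ""
  | s :: rest, flag =>
    if s.length = 0 then get_object_name_loop object_type_name rest flag
    else if flag then s
    else if s = object_type_name then get_object_name_loop object_type_name rest true
    else get_object_name_loop object_type_name rest flag

def get_object_name (object_type_name : String) (object_name_line : String) : String :=
  get_object_name_loop object_type_name ((PySem.Str.split? object_name_line " ").getD []) false

-- ===== PORT B =====
def get_object_name_alt (object_type_name : String) (object_name_line : String) : String :=
  let tokens := ((PySem.Str.split? object_name_line " ").getD []).filter (fun t => t ≠ "")
  match PySem.List.index? tokens object_type_name with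
  | none => ""
  | some i => if i + 1 < tokens.length then tokens.getD (i + 1) "" else ""

-- ===== PRECONDITION & SPEC =====
def Spec_get_object_name (object_type_name : String) (object_name_line : String) (out : String) : Prop := out = get_object_name_alt object_type_name object_name_line
instance (object_type_name : String) (object_name_line : String) (out : String) : Decidable (Spec_get_object_name object_type_name object_name_line out) := by unfold Spec_get_object_name; infer_instance

-- ===== CLAIM (what is proved, stated in full; the proofs are below) =====
def Claim_equal_get_object_name : Prop := ∀ (object_type_name : String) (object_name_line : String), Dom_get_object_name object_type_name object_name_line → Spec_get_object_name object_type_name object_name_line (get_object_name object_type_name object_name_line)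

-- ===== LEMMAS AND PROOFS =====

-- B's core on an already-filtered token list
def altCore (object_type_name : String) (tokens : List String) : String :=
  match PySem.List.index? tokens object_type_name with
  | none => ""
  | some i => if i + 1 < tokens.length then tokens.getD (i + 1) "" else ""

-- skipping empties in A's loop = running it on the filtered list
theorem loop_filter (otn : String) (l : List String) (flag : Bool) :
    get_object_name_loop otn l flag = get_object_name_loop otn (l.filter (fun t => t ≠ "")) flag := by
  induction l generalizing flag with
  | nil => rfl
  | cons s rest ih =>
    by_cases hs : s = ""
    · subst hs
      simp [get_object_name_loop, ih]
    · have hlen : ¬ s.length = 0 := by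
        simpa [String.length_eq_zero_iff] using hs
      have hf : (s :: rest).filter (fun t => t ≠ "") = s :: rest.filter (fun t => t ≠ "") := by
        simp [hs]
      rw [hf]
      cases flag with
      | true => simp [get_object_name_loop, hlen]
      | false =>
        by_cases he : s = otn <;> simp [get_object_name_loop, hlen, he, ih]

-- with flag = true on a clean list, A's loop returns the head (or "")
theorem loop_true (otn : String) (l : List String) (hl : ∀ t ∈ l, t ≠ "") :
    get_object_name_loop otn l true = l.headD "" := by
  cases l with
  | nil => rfl
  | cons s rest =>
    have hs : ¬ s.length = 0 := by
      simpa [String.length_eq_zero_iff] using hl s (by simp)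
    simp [get_object_name_loop, hs]

-- on a clean list, A's loop with flag = false computes B's core
theorem loop_eq_altCore (otn : String) (l : List String) (hl : ∀ t ∈ l, t ≠ "") :
    get_object_name_loop otn l false = altCore otn l := by
  induction l with
  | nil => rfl
  | cons s rest ih =>
    have hs : ¬ s.length = 0 := by
      simpa [String.length_eq_zero_iff] using hl s (by simp)
    have hrest : ∀ t ∈ rest, t ≠ "" := fun t ht => hl t (by simp [ht])
    by_cases he : s = otn
    · subst he
      rw [show get_object_name_loop s (s :: rest) false = get_object_name_loop s rest true by
            simp [get_object_name_loop, hs]]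
      rw [loop_true s rest hrest]
      unfold altCore
      rw [PySem.List.index?_cons_self]
      cases rest with
      | nil => simp
      | cons r rs => simp [List.getD]
    · rw [show get_object_name_loop otn (s :: rest) false = get_object_name_loop otn rest false by
            simp [get_object_name_loop, hs, he]]
      rw [ih hrest]
      unfold altCore
      rw [PySem.List.index?_cons_of_ne rest he]
      cases hidx : PySem.List.index? rest otn with
      | none => rfl
      | some i =>
        have hi : i < rest.length := by
          obtain ⟨hk, -, -⟩ := PySem.List.getElem_of_index?_eq_some hidx
          exact hk
        simp only [Option.map_some, List.length_cons, List.getD]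
        by_cases h1 : i + 1 < rest.length
        · have h2 : i + 1 + 1 < rest.length + 1 := by omega
          simp [h1, h2]
        · have h2 : ¬ (i + 1 + 1 < rest.length + 1) := by omega
          simp [h1, h2]

-- ===== VERDICT (by name: the statement is the Claim_ definition above) =====
theorem get_object_name_spec : Claim_equal_get_object_name := by
  intro otn line _
  unfold Spec_get_object_name get_object_name get_object_name_alt
  rw [loop_filter]
  exact loop_eq_altCore otn _ (fun t ht => by
    have := (List.mem_filter.mp ht).2
    simpa using this)
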